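-- pv_equiv track=rewrite | github.com/madhavkrishangarg/mapreduce-kmeans-clustering | reducer.py | shuffle_and_sort
-- ===== SOURCE A (Python) =====
-- def shuffle_and_sort(data_points):
--     grouped_data_points = {}
--     for data_point in data_points:
--         centroid_id = data_point[0]
--         if centroid_id not in grouped_data_points:
--             grouped_data_points[centroid_id] = []
--         grouped_data_points[centroid_id].append(data_point[1])
--     return grouped_data_points
-- ===== SOURCE B (Python) =====
-- def shuffle_and_sort(data_points):
--     # two-pass: distinct centroid ids in first-occurrence order, then one filtered scan per id
--     order = list(dict.fromkeys(cid for cid, _ in data_points))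
--     return {cid: [vec for c, vec in data_points if c == cid] for cid in order}
-- ===== Notes on version B (the rewrite author's own statement) =====
-- stated objective: alternative
-- what changed: Replaces A's single-pass dict accumulation (setdefault-style insert then append) by a two-pass comprehension: an ordered dedup of the centroid ids followed by one filtered scan of the input per distinct id.
import Mathlib
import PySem

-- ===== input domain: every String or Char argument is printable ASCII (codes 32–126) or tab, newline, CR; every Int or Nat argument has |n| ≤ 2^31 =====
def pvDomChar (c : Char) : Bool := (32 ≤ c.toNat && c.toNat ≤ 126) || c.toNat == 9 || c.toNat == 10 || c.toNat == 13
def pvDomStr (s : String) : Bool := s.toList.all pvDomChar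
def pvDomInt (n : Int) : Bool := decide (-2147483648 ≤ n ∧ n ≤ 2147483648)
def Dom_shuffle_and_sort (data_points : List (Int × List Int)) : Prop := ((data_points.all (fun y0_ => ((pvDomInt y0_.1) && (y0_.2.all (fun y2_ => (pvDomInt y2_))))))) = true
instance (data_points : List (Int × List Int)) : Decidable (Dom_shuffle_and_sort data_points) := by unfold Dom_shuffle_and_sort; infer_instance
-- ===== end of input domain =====

-- B groups by a two-pass ordered-dedup + filtered-scan comprehension instead of A's
-- one-pass dict accumulation (alternative decomposition, same return value).

-- ===== PORT A =====
def shuffle_and_sort (data_points : List (Int × List Int)) : List (Int × List (List Int)) :=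
  (data_points.foldl
    (fun grouped data_point =>
      let centroid_id := data_point.1
      let grouped :=
        if grouped.contains centroid_id then grouped
        else grouped.insert centroid_id ([] : List (List Int))
      -- grouped[centroid_id].append(data_point[1])
      grouped.modify centroid_id [] (fun v => v ++ [data_point.2]))
    PySem.Dict.empty).items

-- ===== PORT B =====
def shuffle_and_sort_alt (data_points : List (Int × List Int)) : List (Int × List (List Int)) :=
  let order := PySem.List.dedup (data_points.map (fun p => p.1))
  order.map (fun cid =>
    (cid, (data_points.filter (fun p => p.1 == cid)).map (fun p => p.2)))

-- ===== PRECONDITION & SPEC =====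
def Spec_shuffle_and_sort (data_points : List (Int × List Int)) (out : List (Int × List (List Int))) : Prop := out = shuffle_and_sort_alt data_points
instance (data_points : List (Int × List Int)) (out : List (Int × List (List Int))) : Decidable (Spec_shuffle_and_sort data_points out) := by unfold Spec_shuffle_and_sort; infer_instance

-- ===== CLAIM (what is proved, stated in full; the proofs are below) =====
def Claim_equal_shuffle_and_sort : Prop := ∀ (data_points : List (Int × List Int)), Dom_shuffle_and_sort data_points → Spec_shuffle_and_sort data_points (shuffle_and_sort data_points)

-- ===== LEMMAS AND PROOFS =====

-- A's per-element step (conditional insert of [] then append) is the plain modify-append step.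
theorem step_eq (d : PySem.Dict Int (List (List Int))) (p : Int × List Int) :
    ((if d.contains p.1 then d else d.insert p.1 ([] : List (List Int))).modify p.1 []
      (fun v => v ++ [p.2]))
    = d.modify p.1 [] (fun v => v ++ [p.2]) := by
  by_cases h : d.contains p.1 = true
  · simp [h]
  · simp only [h]
    simp only [Bool.not_eq_true] at h
    simp [PySem.Dict.modify, PySem.Dict.getD_insert_self, PySem.Dict.insert_insert_self,
      PySem.Dict.getD_of_not_contains _ _ h]

theorem shuffle_eq_modify_fold (data_points : List (Int × List Int)) :
    shuffle_and_sort data_points =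
      (data_points.foldl (fun d p => d.modify p.1 [] (fun v => v ++ [p.2]))
        PySem.Dict.empty).items := by
  unfold shuffle_and_sort
  congr 1
  exact List.foldl_ext _ _ _ (fun d p _ => step_eq d p)

-- ===== VERDICT (by name: the statement is the Claim_ definition above) =====
theorem shuffle_and_sort_spec : Claim_equal_shuffle_and_sort := by
  intro dp _
  unfold Spec_shuffle_and_sort shuffle_and_sort_alt
  rw [shuffle_eq_modify_fold]
  have hkeys :
      (dp.foldl (fun d p => d.modify p.1 [] (fun v => v ++ [p.2])) PySem.Dict.empty).keys
        = PySem.List.dedup (dp.map (fun p => p.1)) := by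
    rw [PySem.Dict.keys_foldl_modify_key dp (fun p => p.1) [] (fun _ p v => v ++ [p.2])]
    simp [PySem.Dict.keys_empty, PySem.Set.update_nil_left, PySem.List.dedup_eq_ofList]
  have hnd :
      (dp.foldl (fun d p => d.modify p.1 [] (fun v => v ++ [p.2])) PySem.Dict.empty).keys.Nodup := by
    exact PySem.Dict.nodup_keys_foldl_modify_key dp (fun p => p.1) [] (fun _ p v => v ++ [p.2])
      PySem.Dict.empty (by simp [PySem.Dict.keys_empty])
  rw [PySem.Dict.items_eq_map_keys _ hnd ([] : List (List Int)), hkeys]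
  apply List.map_congr_left
  intro cid _
  rw [PySem.Dict.getD_foldl_modify_append dp PySem.Dict.empty cid]
  simp [PySem.Dict.getD_empty]
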